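-- pv_equiv track=rewrite | github.com/Yashwanthgoud818/CSA0880-Python | practice programs/15th(5th) june.py | nth_factor
-- ===== SOURCE A (Python) =====
-- def nth_factor(num, n):
--     if num == 0:
--         return None  # Cannot find factors for 0
--     factors = []
--     for i in range(1, abs(num) + 1):
--         if num % i == 0:
--             factors.append(i)
--     if n <= len(factors):
--         return factors[n - 1]
--     else:
--         return None  # Nth factor does not exist
-- ===== SOURCE B (Python) =====
-- def nth_factor(num, n):
--     if num == 0:
--         return None  # Cannot find factors for 0
--     m = abs(num)
--     small = []
--     large = []
--     i = 1
--     while i * i <= m: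
--         if m % i == 0:
--             small.append(i)
--             if i != m // i:
--                 large.append(m // i)
--         i += 1
--     factors = small + large[::-1]
--     if n <= len(factors):
--         return factors[n - 1]
--     else:
--         return None  # Nth factor does not exist
-- ===== Notes on version B (the rewrite author's own statement) =====
-- stated objective: faster
-- what changed: A trial-divides every i in 1..|num| to build the factor list; B enumerates divisor pairs (i, num//i) only up to sqrt(|num|) and concatenates the small divisors with the reversed cofactor list.
-- outside the precondition, e.g. on nth_factor(12, -1): A returns 6, B returns 6; on nth_factor(12, -6): A raises IndexError, B raises IndexError
import Mathlib
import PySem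

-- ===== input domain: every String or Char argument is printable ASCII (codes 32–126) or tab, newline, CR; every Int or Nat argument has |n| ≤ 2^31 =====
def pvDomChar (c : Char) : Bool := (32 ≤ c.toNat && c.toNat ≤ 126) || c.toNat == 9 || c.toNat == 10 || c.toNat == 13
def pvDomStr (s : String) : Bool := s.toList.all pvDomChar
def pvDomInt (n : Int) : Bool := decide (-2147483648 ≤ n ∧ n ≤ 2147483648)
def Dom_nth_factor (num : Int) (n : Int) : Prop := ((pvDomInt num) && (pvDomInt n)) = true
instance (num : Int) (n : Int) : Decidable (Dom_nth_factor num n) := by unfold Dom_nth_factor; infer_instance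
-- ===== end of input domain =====

-- B replaces A's trial division over 1..|num| by divisor-pair enumeration up to sqrt(|num|) (objective: faster).

-- ===== PORT A =====
def nth_factor (num : Int) (n : Int) : Option Int :=
  if num = 0 then none
  else
    let factors : List Int :=
      (PySem.List.pyRange 1 (|num| + 1)).foldl
        (fun acc i => if PySem.Int.mod num i = 0 then acc ++ [i] else acc) []
    if n ≤ (factors.length : Int) then PySem.List.pyGet? factors (n - 1) else none

-- ===== PORT B =====
-- the while-loop of Source B: i counts up while i*i ≤ m, collecting small divisors and their cofactors
def pvPairLoop (m : Int) (i : Int) (small : List Int) (large : List Int) : List Int × List Int :=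
  if _h : i * i ≤ m then
    if PySem.Int.mod m i = 0 then
      pvPairLoop m (i + 1) (small ++ [i])
        (if i ≠ PySem.Int.floordiv m i then large ++ [PySem.Int.floordiv m i] else large)
    else pvPairLoop m (i + 1) small large
  else (small, large)
termination_by (m + 1 - i).toNat
decreasing_by
  all_goals
    have him : i ≤ m := by
      rcases (by omega : i ≤ 0 ∨ 1 ≤ i) with h0 | h1
      · nlinarith
      · nlinarith
    omega

def nth_factor_alt (num : Int) (n : Int) : Option Int :=
  if num = 0 then none
  else
    let m := |num|
    let p := pvPairLoop m 1 [] []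
    let factors := p.1 ++ p.2.reverse   -- small + large[::-1]  (slice [::-1] is reverse: PySem.List.slice?_none_none_neg_one)
    if n ≤ (factors.length : Int) then PySem.List.pyGet? factors (n - 1) else none

-- ===== PRECONDITION & SPEC =====
-- Pre_ excludes all n < 0 (for num ≠ 0): there A raises IndexError whenever n ≤ -d(|num|)
-- (d = number of divisors, not a closed-form quantity a reader can check without counting divisors),
-- and for the remaining -d(|num|) < n < 0 it returns Python's negative-index wraparound value,
-- which Source B returns as well — so Pre_ is narrower than the raise region, and that narrowing is stated here.
def Pre_nth_factor (num : Int) (n : Int) : Prop :=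
  num = 0 ∨ 0 ≤ n
instance (num : Int) (n : Int) : Decidable (Pre_nth_factor num n) := by
  unfold Pre_nth_factor; infer_instance

def pvWitness_nth_factor : Int × Int := (12, 3)

def Spec_nth_factor (num : Int) (n : Int) (out : Option Int) : Prop := out = nth_factor_alt num n
instance (num : Int) (n : Int) (out : Option Int) : Decidable (Spec_nth_factor num n out) := by
  unfold Spec_nth_factor; infer_instance

-- ===== CLAIM (what is proved, stated in full; the proofs are below) =====
def Claim_equal_nth_factor : Prop := ∀ (num : Int) (n : Int), Dom_nth_factor num n → Pre_nth_factor num n → Spec_nth_factor num n (nth_factor num n)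

-- ===== LEMMAS AND PROOFS =====

-- integer square root of m, as an Int
def pvK (m : Int) : Int := (m.toNat.sqrt : Int)

-- the divisors of m that are ≥ i and ≤ sqrt m, ascending (what the loop appends to `small` from i on)
def pvS (m i : Int) : List Int :=
  (PySem.List.pyRange i (pvK m + 1)).filter (fun j => decide (j ∣ m))

-- their cofactors, in order of appearance (what the loop appends to `large` from i on)
def pvL (m i : Int) : List Int :=
  ((PySem.List.pyRange i (pvK m + 1)).filter (fun j => decide (j ∣ m ∧ j * j ≠ m))).map (fun j => m / j)

lemma pvK_sq_le {m : Int} (hm : 1 ≤ m) : pvK m * pvK m ≤ m := by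
  unfold pvK
  have h := Nat.sqrt_le' m.toNat
  have h2 : ((m.toNat.sqrt : Int)) * (m.toNat.sqrt : Int) ≤ (m.toNat : Int) := by
    rw [pow_two] at h; exact_mod_cast h
  omega

lemma pvK_lt_succ_sq {m : Int} (hm : 1 ≤ m) : m < (pvK m + 1) * (pvK m + 1) := by
  unfold pvK
  have h := Nat.lt_succ_sqrt' m.toNat
  have h2 : (m.toNat : Int) < ((m.toNat.sqrt : Int) + 1) * ((m.toNat.sqrt : Int) + 1) := by
    rw [pow_two, Nat.succ_eq_add_one] at h; exact_mod_cast h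
  omega

lemma pvK_pos {m : Int} (hm : 1 ≤ m) : 1 ≤ pvK m := by
  unfold pvK
  have h : 1 ≤ m.toNat.sqrt := Nat.le_sqrt.mpr (by omega)
  omega

lemma pv_cond_iff {m i : Int} (hm : 1 ≤ m) (hi : 1 ≤ i) : i * i ≤ m ↔ i ≤ pvK m := by
  unfold pvK
  have hc : ((i.toNat : Int)) * (i.toNat : Int) = i * i := by
    have : (i.toNat : Int) = i := by omega
    rw [this]
  constructor
  · intro h
    have hn : i.toNat * i.toNat ≤ m.toNat := by
      have : ((i.toNat * i.toNat : Nat) : Int) ≤ ((m.toNat : Nat) : Int) := by push_cast; omega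
      exact_mod_cast this
    have := Nat.le_sqrt.mpr hn
    omega
  · intro h
    have h2 : i.toNat ≤ m.toNat.sqrt := by omega
    have h3 := Nat.sqrt_le' m.toNat
    have h4 : i.toNat * i.toNat ≤ m.toNat.sqrt * m.toNat.sqrt := Nat.mul_le_mul h2 h2
    have h5 : ((i.toNat * i.toNat : Nat) : Int) ≤ ((m.toNat : Nat) : Int) := by
      rw [pow_two] at h3; exact_mod_cast le_trans h4 h3
    push_cast at h5
    omega

lemma pv_ne_div_iff {m i : Int} (hi : 1 ≤ i) (hd : i ∣ m) : i ≠ m / i ↔ i * i ≠ m := by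
  constructor
  · intro h hc
    apply h
    rw [← hc, Int.mul_ediv_cancel_left _ (by omega : i ≠ 0)]
  · intro h hc
    apply h
    nth_rewrite 1 [hc]
    exact Int.ediv_mul_cancel hd

lemma pvPairLoop_eq {m : Int} (hm : 1 ≤ m) :
    ∀ (i : Int) (s l : List Int), 1 ≤ i →
      pvPairLoop m i s l = (s ++ pvS m i, l ++ pvL m i) := by
  have key : ∀ (k : Nat) (i : Int) (s l : List Int), 1 ≤ i → (pvK m + 1 - i).toNat ≤ k →
      pvPairLoop m i s l = (s ++ pvS m i, l ++ pvL m i) := by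
    intro k
    induction k with
    | zero =>
      intro i s l hi hk
      have hgt : pvK m < i := by omega
      have hcond : ¬ (i * i ≤ m) := by rw [pv_cond_iff hm hi]; omega
      rw [pvPairLoop, dif_neg hcond]
      unfold pvS pvL
      rw [PySem.List.pyRange_one_eq_nil (by omega)]
      simp
    | succ k ih =>
      intro i s l hi hk
      by_cases hle : i ≤ pvK m
      · have hcond : i * i ≤ m := (pv_cond_iff hm hi).mpr hle
        rw [pvPairLoop, dif_pos hcond]
        have hrange : PySem.List.pyRange i (pvK m + 1) = i :: PySem.List.pyRange (i + 1) (pvK m + 1) :=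
          PySem.List.pyRange_one_cons (by omega)
        by_cases hd : i ∣ m
        · have hmod : PySem.Int.mod m i = 0 := (PySem.Int.mod_eq_zero_iff_dvd m i).mpr hd
          rw [if_pos hmod]
          have hfd : PySem.Int.floordiv m i = m / i :=
            PySem.Int.floordiv_eq_ediv_of_pos (by omega)
          rw [ih (i + 1) _ _ (by omega) (by omega)]
          unfold pvS pvL
          rw [hrange]
          by_cases hne : i * i ≠ m
          · rw [hfd, if_pos ((pv_ne_div_iff hi hd).mpr hne)]
            simp [hd, hne]
          · rw [not_not] at hne
            rw [hfd, if_neg (by simp [pv_ne_div_iff hi hd, hne])]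
            simp [hd, hne]
        · have hmod : PySem.Int.mod m i ≠ 0 := by
            rw [Ne, PySem.Int.mod_eq_zero_iff_dvd]; exact hd
          rw [if_neg hmod]
          rw [ih (i + 1) _ _ (by omega) (by omega)]
          unfold pvS pvL
          rw [hrange]
          simp [hd]
      · have hcond : ¬ (i * i ≤ m) := by rw [pv_cond_iff hm hi]; omega
        rw [pvPairLoop, dif_neg hcond]
        unfold pvS pvL
        rw [PySem.List.pyRange_one_eq_nil (by omega)]
        simp
  intro i s l hi
  exact key (pvK m + 1 - i).toNat i s l hi le_rfl

lemma pv_div_pos {m a : Int} (hm : 1 ≤ m) (ha : 1 ≤ a) (hd : a ∣ m) : 1 ≤ m / a := by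
  obtain ⟨c, hc⟩ := hd
  rw [hc, Int.mul_ediv_cancel_left _ (by omega : a ≠ 0)]
  nlinarith

lemma pv_div_dvd {m a : Int} (ha : a ≠ 0) (hd : a ∣ m) : m / a ∣ m := by
  obtain ⟨c, hc⟩ := hd
  rw [hc, Int.mul_ediv_cancel_left _ ha]
  exact dvd_mul_left c a

lemma pv_div_div {m a : Int} (hm : 1 ≤ m) (ha : 1 ≤ a) (hd : a ∣ m) : m / (m / a) = a := by
  obtain ⟨c, hc⟩ := hd
  have hc0 : c ≠ 0 := by intro h; rw [h, mul_zero] at hc; omega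
  rw [hc, Int.mul_ediv_cancel_left _ (by omega : a ≠ 0), mul_comm,
    Int.mul_ediv_cancel_left _ hc0]

lemma pv_div_lt_div {m a b : Int} (hm : 1 ≤ m) (ha : 1 ≤ a) (hab : a < b)
    (hda : a ∣ m) (hdb : b ∣ m) : m / b < m / a := by
  obtain ⟨c, hc⟩ := hda
  obtain ⟨d, hd⟩ := hdb
  have h1 : m / a = c := by rw [hc, Int.mul_ediv_cancel_left _ (by omega : a ≠ 0)]
  have h2 : m / b = d := by rw [hd, Int.mul_ediv_cancel_left _ (by omega : b ≠ 0)]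
  rw [h1, h2]
  have hc1 : 1 ≤ c := by nlinarith
  have hd1 : 1 ≤ d := by nlinarith
  by_contra h
  push Not at h
  have e1 : a * c ≤ a * d := by nlinarith
  have e2 : a * d < b * d := by nlinarith
  omega

lemma pv_cof_gt_K {m j : Int} (hm : 1 ≤ m) (hj : 1 ≤ j) (hjK : j ≤ pvK m)
    (hd : j ∣ m) (hne : j * j ≠ m) : pvK m < m / j := by
  have hK2 := pvK_sq_le hm
  have hKpos := pvK_pos hm
  obtain ⟨c, hc⟩ := hd
  have hq : m / j = c := by rw [hc, Int.mul_ediv_cancel_left _ (by omega : j ≠ 0)]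
  rw [hq]
  have hc1 : 1 ≤ c := by nlinarith
  have hjj : j * j < m := by
    have := mul_le_mul hjK hjK (by omega) (by omega)
    rcases (by omega : j * j < m ∨ j * j = m) with h2 | h2
    · exact h2
    · exact absurd h2 hne
  have hjc : j < c := by nlinarith
  by_contra h
  push Not at h
  have e1 : j * c < c * c := by nlinarith
  have e2 : c * c ≤ pvK m * pvK m := by nlinarith
  omega

lemma pv_large_decomp {m x : Int} (hm : 1 ≤ m) (hx : 1 ≤ x) (hxK : pvK m < x)
    (hd : x ∣ m) : 1 ≤ m / x ∧ m / x ≤ pvK m ∧ m / x ∣ m ∧ (m / x) * (m / x) ≠ m ∧ m / (m / x) = x := by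
  have h1 : 1 ≤ m / x := pv_div_pos hm hx hd
  have hsucc := pvK_lt_succ_sq hm
  have hKpos := pvK_pos hm
  have hdd := pv_div_dvd (by omega : x ≠ 0) hd
  have hdiv := pv_div_div hm hx hd
  obtain ⟨c, hc⟩ := hd
  have hcval : m / x = c := by rw [hc, Int.mul_ediv_cancel_left _ (by omega : x ≠ 0)]
  rw [hcval] at h1 hdd hdiv ⊢
  have hcK : c ≤ pvK m := by
    by_contra h
    push Not at h
    have := mul_le_mul (by omega : pvK m + 1 ≤ x) (by omega : pvK m + 1 ≤ c)
      (by omega) (by omega)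
    nlinarith
  refine ⟨h1, hcK, hdd, ?_, hdiv⟩
  intro h
  nlinarith

lemma pv_factors_eq {m : Int} (hm : 1 ≤ m) :
    pvS m 1 ++ (pvL m 1).reverse
      = (PySem.List.pyRange 1 (m + 1)).filter (fun j => decide (j ∣ m)) := by
  have hKpos := pvK_pos hm
  have hK2 := pvK_sq_le hm
  have hKm : pvK m ≤ m := by nlinarith
  have pwS : (pvS m 1).Pairwise (· < ·) :=
    (PySem.List.pairwise_lt_pyRange_one 1 (pvK m + 1)).filter _
  have pwF : ((PySem.List.pyRange 1 (pvK m + 1)).filter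
      (fun j => decide (j ∣ m ∧ j * j ≠ m))).Pairwise (· < ·) :=
    (PySem.List.pairwise_lt_pyRange_one 1 (pvK m + 1)).filter _
  have pwL : (pvL m 1).Pairwise (fun a b => b < a) := by
    unfold pvL
    rw [List.pairwise_map]
    refine pwF.imp_of_mem ?_
    intro a b ha hb hab
    simp [List.mem_filter, PySem.List.mem_pyRange_one] at ha hb
    exact pv_div_lt_div hm (by omega) hab ha.2.1 hb.2.1
  have pwLrev : ((pvL m 1).reverse).Pairwise (· < ·) := by
    rw [List.pairwise_reverse]; exact pwL
  have cross : ∀ a ∈ pvS m 1, ∀ b ∈ (pvL m 1).reverse, a < b := by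
    intro a ha b hb
    rw [List.mem_reverse] at hb
    simp [pvS, List.mem_filter, PySem.List.mem_pyRange_one] at ha
    simp [pvL, List.mem_filter, PySem.List.mem_pyRange_one] at hb
    obtain ⟨j, ⟨⟨hj1, hj2⟩, hjd, hjne⟩, rfl⟩ := hb
    have := pv_cof_gt_K hm hj1 (by omega) hjd hjne
    omega
  have pwLHS : (pvS m 1 ++ (pvL m 1).reverse).Pairwise (· < ·) :=
    List.pairwise_append.mpr ⟨pwS, pwLrev, cross⟩
  have pwRHS : ((PySem.List.pyRange 1 (m + 1)).filter (fun j => decide (j ∣ m))).Pairwise (· < ·) :=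
    (PySem.List.pairwise_lt_pyRange_one 1 (m + 1)).filter _
  have hmem : ∀ x, x ∈ pvS m 1 ++ (pvL m 1).reverse ↔
      x ∈ (PySem.List.pyRange 1 (m + 1)).filter (fun j => decide (j ∣ m)) := by
    intro x
    simp only [List.mem_append, List.mem_reverse]
    simp [pvS, pvL, List.mem_filter, PySem.List.mem_pyRange_one]
    constructor
    · rintro (⟨⟨h1, h2⟩, h3⟩ | ⟨j, ⟨⟨hj1, hj2⟩, hjd, hjne⟩, rfl⟩)
      · exact ⟨⟨h1, by omega⟩, h3⟩
      · have h := pv_div_pos hm hj1 hjd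
        have hdd := pv_div_dvd (by omega : j ≠ 0) hjd
        have hle : m / j ≤ m := Int.le_of_dvd (by omega) hdd
        exact ⟨⟨h, by omega⟩, hdd⟩
    · rintro ⟨⟨h1, h2⟩, h3⟩
      by_cases hK : x ≤ pvK m
      · exact Or.inl ⟨⟨h1, by omega⟩, h3⟩
      · obtain ⟨c1, c2, c3, c4, c5⟩ := pv_large_decomp hm h1 (by omega) h3
        exact Or.inr ⟨m / x, ⟨⟨c1, by omega⟩, c3, c4⟩, c5⟩
  have nd1 : (pvS m 1 ++ (pvL m 1).reverse).Nodup := pwLHS.imp (fun h => ne_of_lt h)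
  have nd2 : ((PySem.List.pyRange 1 (m + 1)).filter (fun j => decide (j ∣ m))).Nodup :=
    pwRHS.imp (fun h => ne_of_lt h)
  exact List.Perm.eq_of_pairwise (fun a b _ _ hab hba => (lt_asymm hab hba).elim)
    pwLHS pwRHS ((List.perm_ext_iff_of_nodup nd1 nd2).mpr hmem)

-- ===== VERDICT (by name: the statement is the Claim_ definition above) =====
theorem nth_factor_spec : Claim_equal_nth_factor := by
  intro num n _ _
  unfold Spec_nth_factor nth_factor nth_factor_alt
  by_cases h0 : num = 0
  · simp [h0]
  · have hm : 1 ≤ |num| := by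
      have := abs_pos.mpr h0; omega
    have hA : (PySem.List.pyRange 1 (|num| + 1)).foldl
        (fun acc i => if PySem.Int.mod num i = 0 then acc ++ [i] else acc) []
        = (PySem.List.pyRange 1 (|num| + 1)).filter (fun j => decide (j ∣ |num|)) := by
      have h := PySem.List.foldl_append_if (fun i => decide (PySem.Int.mod num i = 0))
        (fun i => i) (PySem.List.pyRange 1 (|num| + 1)) []
      simp only [decide_eq_true_eq, List.map_id', List.nil_append] at h
      rw [h]
      apply List.filter_congr
      intro x hx
      rw [PySem.List.mem_pyRange_one] at hx
      simp [PySem.Int.mod_eq_zero_iff_dvd, dvd_abs]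
    have hB := pvPairLoop_eq hm 1 [] [] le_rfl
    simp only [hB, List.nil_append]
    simp [h0, hA, pv_factors_eq hm]
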